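-- pv_equiv track=rewrite | github.com/Komdix/bekap_wins | programko laptop/Done/sady/b_primes copy.py | nth_smallest_prime_divisor
-- ===== SOURCE A (Python) =====
-- def nth_smallest_prime_divisor(num, index):
--
--     count = 0
--     div = 2
--
--     for _ in range(num):
--
--         if num % div == 0:
--             num //= div
--             result = div
--             count += 1
--             div = 1
--
--         div += 1
--
--         if count >= index:
--             return result
--     return None
-- ===== SOURCE B (Python) =====
-- def nth_smallest_prime_divisor(num, index):
--     # Trial division only up to sqrt(num); whatever remains > 1 is prime.
--     if num < 1 or index < 1:
--         return None
--     k = 0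
--     d = 2
--     while d * d <= num:
--         while num % d == 0:
--             num //= d
--             k += 1
--             if k == index:
--                 return d
--         d += 1
--     if num > 1:
--         k += 1
--         if k == index:
--             return num
--     return None
-- ===== Notes on version B (the rewrite author's own statement) =====
-- stated objective: faster
-- what changed: A rescans divisors from 2 over up to num loop iterations; B does trial division only up to sqrt(num) with an inner stripping loop and treats the remaining cofactor > 1 as the final prime factor.
-- outside the precondition, e.g. on nth_smallest_prime_divisor(4, 0): A returns 2, B returns None; on nth_smallest_prime_divisor(3, 0): A raises UnboundLocalError, B returns None
import Mathlib
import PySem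

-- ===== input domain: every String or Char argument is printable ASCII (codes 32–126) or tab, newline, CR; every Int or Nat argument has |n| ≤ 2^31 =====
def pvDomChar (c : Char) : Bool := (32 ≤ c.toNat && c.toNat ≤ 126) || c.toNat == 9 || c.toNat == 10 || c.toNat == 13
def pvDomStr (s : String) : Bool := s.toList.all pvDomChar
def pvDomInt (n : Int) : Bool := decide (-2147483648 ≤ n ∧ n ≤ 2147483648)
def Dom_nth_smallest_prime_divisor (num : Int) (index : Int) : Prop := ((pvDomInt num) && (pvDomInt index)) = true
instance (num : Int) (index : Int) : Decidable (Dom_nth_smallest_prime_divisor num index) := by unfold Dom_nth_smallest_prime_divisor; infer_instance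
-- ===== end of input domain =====

-- B replaces A's O(num) restart-from-2 scan by trial division up to sqrt(num) with an
-- inner loop stripping each divisor; the remaining cofactor > 1 is the last prime factor.

-- ===== PORT A =====
-- the `for _ in range(num)` loop: fuel = num.toNat iterations; early `return` stops the recursion.
-- Python's `result` may be unbound when `count >= index` fires before any division (index ≤ 0);
-- the port carries it as an Option and returns it as-is there (outside Pre_).
def pvALoop (index : Int) : Nat → Int → Int → Int → Option Int → Option Int
  | 0, _, _, _, _ => none
  | fuel+1, num, div, count, result =>
    if PySem.Int.mod num div = 0 then
      -- num //= div; result = div; count += 1; div = 1; div += 1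
      if count + 1 ≥ index then some div
      else pvALoop index fuel (PySem.Int.floordiv num div) 2 (count + 1) (some div)
    else
      -- div += 1
      if count ≥ index then result
      else pvALoop index fuel num (div + 1) count result

def nth_smallest_prime_divisor (num : Int) (index : Int) : Option Int :=
  pvALoop index num.toNat num 2 0 none

-- ===== PORT B =====
-- inner `while num % d == 0` loop; Sum.inl r = early `return d`, Sum.inr = loop exit with state.
-- fuel num.toNat is ample: each division shrinks num by a factor ≥ 2.
def pvBStrip (index : Int) (d : Int) : Nat → Int → Int → Sum Int (Int × Int)
  | 0, num, k => Sum.inr (num, k)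
  | fuel+1, num, k =>
    if PySem.Int.mod num d = 0 then
      if k + 1 = index then Sum.inl d
      else pvBStrip index d fuel (PySem.Int.floordiv num d) (k + 1)
    else Sum.inr (num, k)

-- outer `while d * d <= num` loop; fuel num.toNat + 2 is ample: d grows by 1 each round.
def pvBOuter (index : Int) : Nat → Int → Int → Int → Option Int
  | 0, _, _, _ => none
  | fuel+1, d, num, k =>
    if d * d ≤ num then
      match pvBStrip index d num.toNat num k with
      | Sum.inl r => some r
      | Sum.inr (num', k') => pvBOuter index fuel (d + 1) num' k'
    else
      if num > 1 then (if k + 1 = index then some num else none) else none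

def nth_smallest_prime_divisor_alt (num : Int) (index : Int) : Option Int :=
  if num < 1 ∨ index < 1 then none
  else pvBOuter index (num.toNat + 2) 2 num 0

-- ===== PRECONDITION & SPEC =====
-- Pre_ excludes index < 1 with num ≥ 1, where A's `count >= index` fires on the very first
-- iteration: A raises UnboundLocalError when num is odd, and returns the accidental value 2
-- (the first factor found, regardless of index) when num is even; B returns None there.
def Pre_nth_smallest_prime_divisor (num : Int) (index : Int) : Prop := 1 ≤ index ∨ num < 1
instance (num : Int) (index : Int) : Decidable (Pre_nth_smallest_prime_divisor num index) := by unfold Pre_nth_smallest_prime_divisor; infer_instance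

def pvWitness_nth_smallest_prime_divisor : Int × Int := (12, 2)

def Spec_nth_smallest_prime_divisor (num : Int) (index : Int) (out : Option Int) : Prop := out = nth_smallest_prime_divisor_alt num index
instance (num : Int) (index : Int) (out : Option Int) : Decidable (Spec_nth_smallest_prime_divisor num index out) := by unfold Spec_nth_smallest_prime_divisor; infer_instance

-- ===== CLAIM (what is proved, stated in full; the proofs are below) =====
def Claim_equal_nth_smallest_prime_divisor : Prop := ∀ (num : Int) (index : Int), Dom_nth_smallest_prime_divisor num index → Pre_nth_smallest_prime_divisor num index → Spec_nth_smallest_prime_divisor num index (nth_smallest_prime_divisor num index)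

-- ===== LEMMAS AND PROOFS =====

-- the common reference value: the j-th (1-based) element of n's ascending prime factorization
def pvNthFac (n : Nat) (j : Int) : Option Int :=
  (n.primeFactorsList[(j - 1).toNat]?).map (fun p : Nat => (p : Int))

-- "no prime below d divides n": the invariant both trial divisions maintain
def pvNoSmall (d n : Nat) : Prop := ∀ p : Nat, p.Prime → p ∣ n → d ≤ p

lemma pvNoSmall_two (n : Nat) : pvNoSmall 2 n := fun _ hp _ => hp.two_le

lemma pvNoSmall_succ {d n : Nat} (h : pvNoSmall d n) (hnd : ¬ d ∣ n) : pvNoSmall (d + 1) n := by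
  intro p hp hpn
  rcases Nat.lt_or_ge p (d + 1) with hlt | hge
  · have := h p hp hpn
    have hpd : p = d := by omega
    exact absurd (hpd ▸ hpn) hnd
  · exact hge

lemma pvNoSmall_div {d n : Nat} (h : pvNoSmall d n) (hd : d ∣ n) (hn : 1 ≤ n) :
    pvNoSmall d (n / d) := by
  intro p hp hpn
  exact h p hp (hpn.trans (Nat.div_dvd_of_dvd hd))

lemma pvNoSmall_eq_one {d n : Nat} (hn : 1 ≤ n) (h : pvNoSmall d n) (hlt : n < d) : n = 1 := by
  by_contra hne
  have h2 : 2 ≤ n := by omega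
  have hp := Nat.minFac_prime (by omega : n ≠ 1)
  have h1 := h n.minFac hp (Nat.minFac_dvd n)
  have h2' := Nat.minFac_le (by omega : 0 < n)
  omega

lemma pv_cons {d n : Nat} (hd : 2 ≤ d) (hdvd : d ∣ n) (hn : 1 ≤ n) (h : pvNoSmall d n) :
    n.primeFactorsList = d :: (n / d).primeFactorsList := by
  have hdn : d ≤ n := Nat.le_of_dvd (by omega) hdvd
  have hmf : n.minFac = d := by
    have h1 : n.minFac ≤ d := Nat.minFac_le_of_dvd hd hdvd
    have h2 : d ≤ n.minFac := h n.minFac (Nat.minFac_prime (by omega : n ≠ 1)) (Nat.minFac_dvd n)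
    omega
  obtain ⟨m, rfl⟩ : ∃ m, n = m + 2 := ⟨n - 2, by omega⟩
  rw [Nat.primeFactorsList_add_two, hmf]

lemma pv_prime_of_sq {d n : Nat} (hn : 2 ≤ n) (h : pvNoSmall d n) (hlt : n < d * d) :
    n.Prime := by
  by_contra hnp
  have h1 := Nat.minFac_sq_le_self (by omega : 0 < n) hnp
  have h2 : d ≤ n.minFac := h n.minFac (Nat.minFac_prime (by omega : n ≠ 1)) (Nat.minFac_dvd n)
  have : d * d ≤ n.minFac * n.minFac := Nat.mul_le_mul h2 h2
  have : n.minFac ^ 2 = n.minFac * n.minFac := by ring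
  omega

-- indexing shift: dropping the head moves the 1-based index down by one
lemma pvNthFac_cons {d : Nat} {l : List Nat} {j : Int} (hj : 2 ≤ j) (n' : Nat)
    (hl : (n' : Nat).primeFactorsList = l) :
    Option.map (fun p : Nat => (p : Int)) ((d :: l)[(j - 1).toNat]?)
      = pvNthFac n' (j - 1) := by
  have hidx : (j - 1).toNat = (j - 1 - 1).toNat + 1 := by omega
  rw [hidx]
  simp [pvNthFac, hl]

-- the divisibility test in both ports, on casts
lemma pv_mod_iff (n d : Nat) :
    (PySem.Int.mod (n : Int) (d : Int) = 0) ↔ d ∣ n := by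
  rw [PySem.Int.mod_eq_zero_iff_dvd]
  exact Int.natCast_dvd_natCast

lemma pvALoop_eq (index : Int) : ∀ (fuel n d : Nat) (k : Int) (res : Option Int),
    n + 1 ≤ fuel + d → 1 ≤ n → 2 ≤ d → k < index → pvNoSmall d n →
    pvALoop index fuel (n : Int) (d : Int) k res = pvNthFac n (index - k) := by
  intro fuel
  induction fuel with
  | zero =>
    intro n d k res hfuel hn hd hk hns
    have hn1 : n = 1 := pvNoSmall_eq_one hn hns (by omega)
    subst hn1
    simp [pvALoop, pvNthFac]
  | succ fuel ih =>
    intro n d k res hfuel hn hd hk hns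
    rw [pvALoop]
    by_cases hdvd : d ∣ n
    · rw [if_pos ((pv_mod_iff n d).mpr hdvd)]
      have hcons := pv_cons hd hdvd hn hns
      by_cases hret : k + 1 ≥ index
      · rw [if_pos hret]
        have hio : index - k = 1 := by omega
        simp [pvNthFac, hio, hcons]
      · rw [if_neg hret]
        obtain ⟨m, rfl⟩ := hdvd
        obtain ⟨m', rfl⟩ : ∃ m', m = m' + 1 := by
          cases m with
          | zero => simp at hn
          | succ m' => exact ⟨m', rfl⟩
        have hdivcast : PySem.Int.floordiv ((d * (m' + 1) : Nat) : Int) (d : Int)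
            = ((d * (m' + 1) / d : Nat) : Int) := PySem.Int.floordiv_natCast _ _
        have hdiv : d * (m' + 1) / d = m' + 1 := Nat.mul_div_cancel_left _ (by omega)
        rw [hdivcast, hdiv]
        have h2 : ((2 : Nat) : Int) = (2 : Int) := by norm_num
        rw [← h2]
        have hfuel' : (m' + 1) + 1 ≤ fuel + 2 := by nlinarith [Nat.le_mul_of_pos_left m' (show 0 < d by omega)]
        rw [ih (m' + 1) 2 (k + 1) (some (d : Int)) hfuel' (by omega) (by omega) (by omega)
          (pvNoSmall_two _)]
        rw [show pvNthFac (d * (m' + 1)) (index - k)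
              = Option.map (fun p : Nat => (p : Int)) ((d :: (m' + 1).primeFactorsList)[(index - k - 1).toNat]?) by
            simp [pvNthFac, hcons, hdiv]]
        have := pvNthFac_cons (d := d) (l := (m' + 1).primeFactorsList) (j := index - k)
          (by omega) (m' + 1) rfl
        rw [this]
        congr 1
        omega
    · rw [if_neg (by rw [pv_mod_iff n d]; exact hdvd)]
      rw [if_neg (by omega)]
      have hcast : ((d : Int) + 1) = ((d + 1 : Nat) : Int) := by push_cast; ring
      rw [hcast]
      exact ih n (d + 1) k res (by omega) hn (by omega) hk (pvNoSmall_succ hns hdvd)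

lemma pvBStrip_spec (index : Int) (d : Nat) (hd : 2 ≤ d) :
    ∀ (fuel n : Nat) (k : Int), n ≤ fuel → 1 ≤ n → k < index → pvNoSmall d n →
    (pvBStrip index (d : Int) fuel (n : Int) k = Sum.inl (d : Int)
        ∧ pvNthFac n (index - k) = some (d : Int))
    ∨ (∃ (n' : Nat) (k' : Int), pvBStrip index (d : Int) fuel (n : Int) k = Sum.inr ((n' : Int), k')
        ∧ ¬ d ∣ n' ∧ 1 ≤ n' ∧ n' ≤ n ∧ k ≤ k' ∧ k' < index ∧ pvNoSmall d n'
        ∧ pvNthFac n (index - k) = pvNthFac n' (index - k')) := by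
  intro fuel
  induction fuel with
  | zero => intro n k hfuel hn; omega
  | succ fuel ih =>
    intro n k hfuel hn hk hns
    rw [pvBStrip]
    by_cases hdvd : d ∣ n
    · rw [if_pos ((pv_mod_iff n d).mpr hdvd)]
      have hcons := pv_cons hd hdvd hn hns
      by_cases hret : k + 1 = index
      · left
        rw [if_pos hret]
        have hio : index - k = 1 := by omega
        exact ⟨rfl, by simp [pvNthFac, hio, hcons]⟩
      · rw [if_neg hret]
        have hdn : d ≤ n := Nat.le_of_dvd (by omega) hdvd
        have hdivcast : PySem.Int.floordiv ((n : Nat) : Int) (d : Int)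
            = ((n / d : Nat) : Int) := PySem.Int.floordiv_natCast _ _
        rw [hdivcast]
        have hlt : n / d < n := Nat.div_lt_self (by omega) (by omega)
        have hn' : 1 ≤ n / d := Nat.one_le_div_iff (by omega) |>.mpr hdn
        have hshift : pvNthFac n (index - k) = pvNthFac (n / d) (index - (k + 1)) := by
          rw [show pvNthFac n (index - k)
                = Option.map (fun p : Nat => (p : Int)) ((d :: (n / d).primeFactorsList)[(index - k - 1).toNat]?) by
              simp [pvNthFac, hcons]]
          rw [pvNthFac_cons (by omega) (n / d) rfl]
          congr 1
          omega
        rcases ih (n / d) (k + 1) (by omega) hn' (by omega) (pvNoSmall_div hns hdvd hn) with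
          ⟨heq, hval⟩ | ⟨n', k', heq, hprops⟩
        · left; exact ⟨heq, by rw [hshift]; exact hval⟩
        · right
          exact ⟨n', k', heq, hprops.1, hprops.2.1, by omega, by omega, hprops.2.2.2.2.1,
            hprops.2.2.2.2.2.1, by rw [hshift]; exact hprops.2.2.2.2.2.2⟩
    · rw [if_neg (by rw [pv_mod_iff n d]; exact hdvd)]
      right
      exact ⟨n, k, rfl, hdvd, hn, le_refl n, le_refl k, hk, hns, rfl⟩

lemma pvBOuter_eq (index : Int) : ∀ (fuel d n : Nat) (k : Int),
    n + 2 ≤ fuel + d → 1 ≤ n → 2 ≤ d → k < index → pvNoSmall d n →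
    pvBOuter index fuel (d : Int) (n : Int) k = pvNthFac n (index - k) := by
  intro fuel
  induction fuel with
  | zero =>
    intro d n k hfuel hn hd hk hns
    have hn1 : n = 1 := pvNoSmall_eq_one hn hns (by omega)
    subst hn1
    simp [pvBOuter, pvNthFac]
  | succ fuel ih =>
    intro d n k hfuel hn hd hk hns
    rw [pvBOuter]
    by_cases hdd : d * d ≤ n
    · rw [if_pos (by exact_mod_cast hdd)]
      have htn : ((n : Int)).toNat = n := Int.toNat_natCast n
      rw [htn]
      rcases pvBStrip_spec index d hd n n k (le_refl n) hn hk hns with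
        ⟨heq, hval⟩ | ⟨n', k', heq, hnd, hn', hle, hkk, hk', hns', hfac⟩
      · rw [heq, hval]
      · rw [heq]
        have hcast : ((d : Int) + 1) = ((d + 1 : Nat) : Int) := by push_cast; ring
        rw [hcast]
        exact (ih (d + 1) n' k' (by omega) hn' (by omega) hk' (pvNoSmall_succ hns' hnd)).trans hfac.symm
    · rw [if_neg (by exact_mod_cast hdd)]
      by_cases h1 : n = 1
      · subst h1
        norm_num [pvNthFac]
      · have h2 : 2 ≤ n := by omega
        have hp : n.Prime := pv_prime_of_sq h2 hns (by omega)
        have hfl : n.primeFactorsList = [n] := Nat.primeFactorsList_prime hp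
        rw [if_pos (by exact_mod_cast h2)]
        by_cases hret : k + 1 = index
        · rw [if_pos hret]
          have hio : index - k = 1 := by omega
          simp [pvNthFac, hio, hfl]
        · rw [if_neg hret]
          have hidx : 1 ≤ (index - k - 1).toNat := by omega
          simp only [pvNthFac, hfl]
          rw [List.getElem?_eq_none (by simpa using hidx)]
          rfl

-- ===== VERDICT (by name: the statement is the Claim_ definition above) =====
theorem nth_smallest_prime_divisor_spec : Claim_equal_nth_smallest_prime_divisor := by
  unfold Claim_equal_nth_smallest_prime_divisor
  intro num index hDom hPre
  unfold Spec_nth_smallest_prime_divisor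
  unfold Pre_nth_smallest_prime_divisor at hPre
  unfold nth_smallest_prime_divisor nth_smallest_prime_divisor_alt
  by_cases h1 : num < 1
  · have : num.toNat = 0 := by omega
    rw [this, if_pos (Or.inl h1)]
    simp [pvALoop]
  · rw [if_neg (by omega)]
    have hidx : 1 ≤ index := by rcases hPre with h | h <;> omega
    obtain ⟨n, rfl⟩ : ∃ n : Nat, num = (n : Int) := ⟨num.toNat, by omega⟩
    have hn : 1 ≤ n := by exact_mod_cast not_lt.mp h1
    have htn : ((n : Int)).toNat = n := Int.toNat_natCast n
    rw [htn]
    have h2 : ((2 : Nat) : Int) = (2 : Int) := by norm_num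
    rw [← h2]
    rw [pvALoop_eq index n n 2 0 none (by omega) hn (by omega) (by omega) (pvNoSmall_two n)]
    rw [pvBOuter_eq index (n + 2) 2 n 0 (by omega) hn (by omega) (by omega) (pvNoSmall_two n)]
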